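-- pv_equiv track=rewrite | github.com/tac-tac-go/Codewars | Halving_Sum/Halving_Sum.py | halving_sum
-- ===== SOURCE A (Python) =====
-- def halving_sum(n):
--     index = 1
--     result = 0
--     while True:
--         if n//(index)<1:
--             break
--         result += n//(index)
--         index*=2
--     return result
-- ===== SOURCE B (Python) =====
-- def halving_sum(n):
--     # Simpler: halving recurrence — floor division composes, so recurse on n//2.
--     if n < 1:
--         return 0
--     return n + halving_sum(n // 2)
-- ===== Notes on version B (the rewrite author's own statement) =====
-- stated objective: simpler
-- what changed: Replaced the divisor-doubling while-loop accumulating floor quotients of the fixed n by a direct recurrence on the halved argument (add n, recurse on n//2, stop once the argument drops below one), using that floor division composes.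
import Mathlib
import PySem

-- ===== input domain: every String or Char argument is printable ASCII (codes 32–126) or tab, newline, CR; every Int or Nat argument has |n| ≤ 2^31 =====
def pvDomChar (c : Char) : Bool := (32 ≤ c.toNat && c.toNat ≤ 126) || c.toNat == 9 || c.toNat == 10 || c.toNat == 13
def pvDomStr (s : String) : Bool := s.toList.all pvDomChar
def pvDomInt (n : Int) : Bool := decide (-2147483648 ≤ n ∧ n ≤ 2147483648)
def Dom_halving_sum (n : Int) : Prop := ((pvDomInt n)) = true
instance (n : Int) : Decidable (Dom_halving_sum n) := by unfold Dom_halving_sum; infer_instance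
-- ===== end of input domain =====

-- B replaces A's divisor-doubling while-loop by the halving recurrence n + halving_sum(n//2) (simpler decomposition; same value).


-- ===== PORT A =====
-- the while-loop of A: state (index, result); the invariant 1 ≤ index (true at entry, preserved
-- by index*2) is carried as a hypothesis only to justify termination
def halvingLoop (n index result : Int) (h : 1 ≤ index) : Int :=
  if PySem.Int.floordiv n index < 1 then result
  else halvingLoop n (index * 2) (result + PySem.Int.floordiv n index) (by omega)
termination_by (n + 1 - index).toNat
decreasing_by
  have h1 : 1 ≤ PySem.Int.floordiv n index := by omega
  rw [PySem.Int.le_floordiv_iff_mul_le (by omega)] at h1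
  omega

def halving_sum (n : Int) : Int := halvingLoop n 1 0 (by omega)

-- ===== PORT B =====
def halving_sum_alt (n : Int) : Int :=
  if n < 1 then 0
  else n + halving_sum_alt (PySem.Int.floordiv n 2)
termination_by n.toNat
decreasing_by
  have h1 : PySem.Int.floordiv n 2 < n := by
    rw [PySem.Int.floordiv_lt_iff_lt_mul (by omega)]; omega
  omega

-- ===== PRECONDITION & SPEC =====
def Spec_halving_sum (n : Int) (out : Int) : Prop := out = halving_sum_alt n
instance (n : Int) (out : Int) : Decidable (Spec_halving_sum n out) := by unfold Spec_halving_sum; infer_instance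

-- ===== CLAIM (what is proved, stated in full; the proofs are below) =====
def Claim_equal_halving_sum : Prop := ∀ (n : Int), Dom_halving_sum n → Spec_halving_sum n (halving_sum n)

-- ===== LEMMAS AND PROOFS =====

theorem halving_sum_alt_base {m : Int} (h : m < 1) : halving_sum_alt m = 0 := by
  rw [halving_sum_alt]; simp [h]

theorem halving_sum_alt_step {m : Int} (h : ¬ m < 1) :
    halving_sum_alt m = m + halving_sum_alt (PySem.Int.floordiv m 2) := by
  rw [halving_sum_alt]; simp [h]

-- floor division by positive divisors composes
theorem floordiv_floordiv (n index : Int) (h : 1 ≤ index) :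
    PySem.Int.floordiv (PySem.Int.floordiv n index) 2 = PySem.Int.floordiv n (index * 2) := by
  rw [PySem.Int.floordiv_eq_ediv_of_pos (by omega : (0:Int) < index),
      PySem.Int.floordiv_eq_ediv_of_pos (by omega : (0:Int) < 2),
      PySem.Int.floordiv_eq_ediv_of_pos (by omega : (0:Int) < index * 2)]
  exact Int.ediv_ediv_of_nonneg (by omega)

-- loop invariant: A's loop from state (index, result) computes result + B's value at n//index
theorem halvingLoop_eq (n index result : Int) (h : 1 ≤ index) :
    halvingLoop n index result h = result + halving_sum_alt (PySem.Int.floordiv n index) := by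
  rw [halvingLoop]
  by_cases hlt : PySem.Int.floordiv n index < 1
  · simp [hlt, halving_sum_alt_base hlt]
  · simp only [hlt, if_false]
    rw [halvingLoop_eq n (index * 2) (result + PySem.Int.floordiv n index) (by omega),
        halving_sum_alt_step hlt, floordiv_floordiv n index h]
    ring
termination_by (n + 1 - index).toNat
decreasing_by
  have h1 : 1 ≤ PySem.Int.floordiv n index := by omega
  rw [PySem.Int.le_floordiv_iff_mul_le (by omega)] at h1
  omega

-- ===== VERDICT (by name: the statement is the Claim_ definition above) =====
theorem halving_sum_spec : Claim_equal_halving_sum := by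
  intro n _
  unfold Spec_halving_sum halving_sum
  rw [halvingLoop_eq]
  simp [PySem.Int.floordiv]
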